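-- pv_equiv track=rewrite | github.com/tbech12/CPSC322-Final-Project | mysklearn/myutils.py | get_rating_count
-- ===== SOURCE A (Python) =====
-- def get_rating_count(rating_list):
--     ratings = ['Approved', 'G', 'GP', 'M/PG', 'N/A',
--     'NC-17', 'Not Rated', 'PG', 'PG-13', 'Passed',
--     'R', 'TV-14', 'TV-G', 'TV-MA', 'TV-PG', 'TV-Y7-FV',
--     'Unrated', 'X']
--     converted_rating = [0,0,0,0,0]
--     for rating in rating_list:
--         if ratings[0] == rating:
--             converted_rating[0] += 1
--         elif ratings[1] == rating:
--             converted_rating[1] += 1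
--         elif ratings[2] == rating:
--             converted_rating[2] += 1
--         elif ratings[3] == rating:
--             converted_rating[3] += 1
--         else:
--             converted_rating[0] += 1
--     return converted_rating
-- ===== SOURCE B (Python) =====
-- def get_rating_count(rating_list):
--     counts = {}
--     for rating in rating_list:
--         counts[rating] = counts.get(rating, 0) + 1
--     g = counts.get('G', 0)
--     gp = counts.get('GP', 0)
--     mpg = counts.get('M/PG', 0)
--     return [len(rating_list) - g - gp - mpg, g, gp, mpg, 0]
-- ===== Notes on version B (the rewrite author's own statement) =====
-- stated objective: idiomatic
-- what changed: Replaces the per-element if/elif cascade with a single dict tally pass; the three named buckets are read from the table and bucket 0 is derived by subtraction from the list length, index 4 stays 0.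
import Mathlib
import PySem

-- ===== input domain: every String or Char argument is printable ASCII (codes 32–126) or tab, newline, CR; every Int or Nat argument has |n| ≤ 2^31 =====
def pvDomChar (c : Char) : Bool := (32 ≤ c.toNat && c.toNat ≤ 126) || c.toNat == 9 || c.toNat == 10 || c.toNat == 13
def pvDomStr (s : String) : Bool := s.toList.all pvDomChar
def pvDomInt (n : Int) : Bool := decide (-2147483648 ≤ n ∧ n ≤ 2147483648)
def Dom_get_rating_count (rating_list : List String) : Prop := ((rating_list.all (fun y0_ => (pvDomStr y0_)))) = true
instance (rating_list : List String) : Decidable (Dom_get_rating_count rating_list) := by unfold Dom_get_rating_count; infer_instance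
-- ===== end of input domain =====

-- B replaces A's per-element if/elif cascade with one dict tally pass, reading the three
-- named buckets from the table and deriving bucket 0 by subtraction (idiomatic; same cost).


-- ===== PORT A =====
-- A's `ratings` list; accesses ratings[0..3] are in range, ported with getD "".
def pvRatingsA : List String :=
  ["Approved", "G", "GP", "M/PG", "N/A",
   "NC-17", "Not Rated", "PG", "PG-13", "Passed",
   "R", "TV-14", "TV-G", "TV-MA", "TV-PG", "TV-Y7-FV",
   "Unrated", "X"]

def pvStepA (converted_rating : List Int) (rating : String) : List Int :=
  if pvRatingsA.getD 0 "" == rating then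
    converted_rating.set 0 (converted_rating.getD 0 0 + 1)
  else if pvRatingsA.getD 1 "" == rating then
    converted_rating.set 1 (converted_rating.getD 1 0 + 1)
  else if pvRatingsA.getD 2 "" == rating then
    converted_rating.set 2 (converted_rating.getD 2 0 + 1)
  else if pvRatingsA.getD 3 "" == rating then
    converted_rating.set 3 (converted_rating.getD 3 0 + 1)
  else
    converted_rating.set 0 (converted_rating.getD 0 0 + 1)

def get_rating_count (rating_list : List String) : List Int :=
  rating_list.foldl pvStepA [0, 0, 0, 0, 0]

-- ===== PORT B =====
def get_rating_count_alt (rating_list : List String) : List Int :=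
  let counts := rating_list.foldl (fun d r => d.insert r (d.getD r 0 + 1))
    (PySem.Dict.empty : PySem.Dict String Int)
  let g := counts.getD "G" 0
  let gp := counts.getD "GP" 0
  let mpg := counts.getD "M/PG" 0
  [(rating_list.length : Int) - g - gp - mpg, g, gp, mpg, 0]

-- ===== PRECONDITION & SPEC =====
def Spec_get_rating_count (rating_list : List String) (out : List Int) : Prop := out = get_rating_count_alt rating_list
instance (rating_list : List String) (out : List Int) : Decidable (Spec_get_rating_count rating_list out) := by unfold Spec_get_rating_count; infer_instance

-- ===== CLAIM (what is proved, stated in full; the proofs are below) =====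
def Claim_equal_get_rating_count : Prop := ∀ (rating_list : List String), Dom_get_rating_count rating_list → Spec_get_rating_count rating_list (get_rating_count rating_list)

-- ===== LEMMAS AND PROOFS =====
-- Invariant of A's loop: starting from [a,b,c,d,e], it adds the bucket counts.
theorem getA_foldl (l : List String) (a b c d e : Int) :
    l.foldl pvStepA [a, b, c, d, e]
    = [a + ((l.length : Int) - l.count "G" - l.count "GP" - l.count "M/PG"),
       b + l.count "G", c + l.count "GP", d + l.count "M/PG", e] := by
  induction l generalizing a b c d e with
  | nil => simp
  | cons r t ih =>
    rw [List.foldl_cons]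
    by_cases h1 : r = "Approved"
    · subst h1
      have hs : pvStepA [a, b, c, d, e] "Approved" = [a + 1, b, c, d, e] := by
        simp [pvStepA, pvRatingsA]
      rw [hs, ih]
      simp [List.count_cons]; push_cast; and_intros <;> ring
    · by_cases h2 : r = "G"
      · subst h2
        have hs : pvStepA [a, b, c, d, e] "G" = [a, b + 1, c, d, e] := by
          simp [pvStepA, pvRatingsA]
        rw [hs, ih]
        simp [List.count_cons]; push_cast; and_intros <;> ring
      · by_cases h3 : r = "GP"
        · subst h3
          have hs : pvStepA [a, b, c, d, e] "GP" = [a, b, c + 1, d, e] := by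
            simp [pvStepA, pvRatingsA]
          rw [hs, ih]
          simp [List.count_cons]; push_cast; and_intros <;> ring
        · by_cases h4 : r = "M/PG"
          · subst h4
            have hs : pvStepA [a, b, c, d, e] "M/PG" = [a, b, c, d + 1, e] := by
              simp [pvStepA, pvRatingsA]
            rw [hs, ih]
            simp [List.count_cons]; push_cast; and_intros <;> ring
          · have hs : pvStepA [a, b, c, d, e] r = [a + 1, b, c, d, e] := by
              simp [pvStepA, pvRatingsA, Ne.symm h1, Ne.symm h2, Ne.symm h3, Ne.symm h4]
            rw [hs, ih]
            have c2 : (r == "G") = false := by simp [h2]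
            have c3 : (r == "GP") = false := by simp [h3]
            have c4 : (r == "M/PG") = false := by simp [h4]
            simp [List.count_cons, c2, c3, c4]; push_cast; and_intros <;> ring

-- ===== VERDICT (by name: the statement is the Claim_ definition above) =====
theorem get_rating_count_spec : Claim_equal_get_rating_count := by
  intro l _
  unfold Spec_get_rating_count get_rating_count get_rating_count_alt
  rw [getA_foldl]
  simp [PySem.Dict.getD_foldl_insert_add_one]
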